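-- pv_equiv track=rewrite | github.com/mxyooR/README-checker | readme_checker/metrics/loc.py | _is_vendor
-- ===== SOURCE A (Python) =====
-- VENDOR_PATTERNS: list[str] = [
--     "vendor/",
--     "node_modules/",
--     "third_party/",
--     "third-party/",
--     "external/",
--     "deps/",
--     "lib/",  # Often contains vendored code
--     "packages/",  # Monorepo packages (analyze separately)
-- ]
--
-- def _is_vendor(relative_path: str) -> bool:
--     """Check if file is vendor/third-party code."""
--     path_lower = relative_path.lower().replace("\\", "/")
--
--     for pattern in VENDOR_PATTERNS:
--         if pattern.endswith("/"):
--             if path_lower.startswith(pattern) or f"/{pattern}" in path_lower: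
--                 return True
--         else:
--             if pattern in path_lower:
--                 return True
--
--     return False
-- ===== SOURCE B (Python) =====
-- _VENDOR_NAMES = frozenset({
--     "vendor",
--     "node_modules",
--     "third_party",
--     "third-party",
--     "external",
--     "deps",
--     "lib",
--     "packages",
-- })
--
-- def _is_vendor(relative_path: str) -> bool:
--     """Check if file is vendor/third-party code."""
--     norm = "".join("/" if ch == "\\" else ch for ch in relative_path.lower())
--     segments = norm.split("/")
--     return not _VENDOR_NAMES.isdisjoint(segments[:-1])
-- ===== Notes on version B (the rewrite author's own statement) =====
-- stated objective: idiomatic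
-- what changed: Instead of scanning the 8 vendor patterns doing two substring searches over the path for each, B normalizes the path in one per-character pass, splits it once into slash-separated components, and asks whether the non-final components are disjoint from a precomputed frozenset of vendor directory names.
import Mathlib
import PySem

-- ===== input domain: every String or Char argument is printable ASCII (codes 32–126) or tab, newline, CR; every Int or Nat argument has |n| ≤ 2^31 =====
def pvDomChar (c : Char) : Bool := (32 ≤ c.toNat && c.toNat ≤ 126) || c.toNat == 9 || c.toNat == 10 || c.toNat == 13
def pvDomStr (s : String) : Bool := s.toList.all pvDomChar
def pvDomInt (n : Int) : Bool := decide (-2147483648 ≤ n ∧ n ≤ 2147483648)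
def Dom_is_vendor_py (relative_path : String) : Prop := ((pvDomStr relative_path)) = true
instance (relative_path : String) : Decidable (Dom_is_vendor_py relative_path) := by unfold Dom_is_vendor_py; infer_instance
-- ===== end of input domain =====

-- B replaces A's per-pattern substring scans by one split of the normalized path into
-- '/'-separated components and a set-disjointness test on the non-final components
-- (objective: idiomatic; return value only).

-- ===== PORT A =====
def vendorPatterns : List (List Char) :=
  [ ['v','e','n','d','o','r','/'],
    ['n','o','d','e','_','m','o','d','u','l','e','s','/'],
    ['t','h','i','r','d','_','p','a','r','t','y','/'],
    ['t','h','i','r','d','-','p','a','r','t','y','/'],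
    ['e','x','t','e','r','n','a','l','/'],
    ['d','e','p','s','/'],
    ['l','i','b','/'],
    ['p','a','c','k','a','g','e','s','/'] ]

-- the body of A's `for pattern in VENDOR_PATTERNS` loop (early `return True` = List.any)
def checkA (path_lower : List Char) : Bool :=
  vendorPatterns.any (fun pattern =>
    if PySem.Chars.endswith pattern ['/'] then
      PySem.Chars.startswith path_lower pattern || PySem.Chars.isIn ('/' :: pattern) path_lower
    else
      PySem.Chars.isIn pattern path_lower)

def is_vendor_py (relative_path : String) : Bool :=
  checkA (PySem.Chars.replace (PySem.Chars.lower relative_path.toList) ['\\'] ['/'])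

-- ===== PORT B =====
-- frozenset of the vendor directory names (Source B's _VENDOR_NAMES)
def vendorNames : PySem.Set (List Char) :=
  PySem.Set.ofList
    [ "vendor".toList, "node_modules".toList, "third_party".toList, "third-party".toList,
      "external".toList, "deps".toList, "lib".toList, "packages".toList ]

-- norm.split("/"): Python's str.split with an explicit separator (keeps empty segments)
def splitSlash : List Char → List (List Char)
  | [] => [[]]
  | c :: rest =>
    if c = '/' then [] :: splitSlash rest
    else
      match splitSlash rest with
      | s :: ss => (c :: s) :: ss
      | [] => [[c]]

def is_vendor_py_alt (relative_path : String) : Bool :=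
  -- "".join("/" if ch == "\\" else ch for ch in relative_path.lower())
  let norm := (PySem.Chars.lower relative_path.toList).map (fun ch => if ch = '\\' then '/' else ch)
  let segments := splitSlash norm
  -- not _VENDOR_NAMES.isdisjoint(segments[:-1])
  !(segments.dropLast.all (fun seg => !(decide (seg ∈ vendorNames))))

-- ===== PRECONDITION & SPEC =====
def Spec_is_vendor_py (relative_path : String) (out : Bool) : Prop := out = is_vendor_py_alt relative_path
instance (relative_path : String) (out : Bool) : Decidable (Spec_is_vendor_py relative_path out) := by unfold Spec_is_vendor_py; infer_instance

-- ===== CLAIM (what is proved, stated in full; the proofs are below) =====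
def Claim_equal_is_vendor_py : Prop := ∀ (relative_path : String), Dom_is_vendor_py relative_path → Spec_is_vendor_py relative_path (is_vendor_py relative_path)

-- ===== LEMMAS AND PROOFS =====

lemma slash_not_mem_vendorNames : ∀ w ∈ vendorNames, ('/' : Char) ∉ w := by decide

lemma endswith_all : ∀ p ∈ vendorPatterns, PySem.Chars.endswith p ['/'] = true := by decide

lemma patterns_eq : vendorPatterns = vendorNames.map (fun w => w ++ ['/']) := by decide

-- replacing the single char '\' by '/' is the per-character map
lemma replace_go_single (fuel : Nat) : ∀ (l acc : List Char), l.length ≤ fuel →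
    PySem.Chars.replace.go ['\\'] ['/'] fuel l acc =
      acc.reverse ++ l.map (fun ch => if ch = '\\' then '/' else ch) := by
  induction fuel with
  | zero =>
    intro l acc h
    have : l = [] := List.eq_nil_of_length_eq_zero (Nat.le_zero.mp h)
    subst this
    simp [PySem.Chars.replace.go]
  | succ n ih =>
    intro l acc h
    cases l with
    | nil => simp [PySem.Chars.replace.go]
    | cons c t =>
      by_cases hc : c = '\\'
      · subst hc
        have hpre : (['\\'] : List Char).isPrefixOf ('\\' :: t) = true := by
          simp [List.isPrefixOf]
        rw [show PySem.Chars.replace.go ['\\'] ['/'] (n+1) ('\\' :: t) acc =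
              PySem.Chars.replace.go ['\\'] ['/'] n (List.drop 1 ('\\' :: t)) (['/'].reverse ++ acc) by
          simp [PySem.Chars.replace.go, hpre]]
        rw [ih (List.drop 1 ('\\' :: t)) (['/'].reverse ++ acc) (by simpa using Nat.le_of_succ_le_succ h)]
        simp
      · have hpre : (['\\'] : List Char).isPrefixOf (c :: t) = false := by
          simp [List.isPrefixOf]
          exact fun hh => hc hh.symm
        rw [show PySem.Chars.replace.go ['\\'] ['/'] (n+1) (c :: t) acc =
              PySem.Chars.replace.go ['\\'] ['/'] n t (c :: acc) by
          simp [PySem.Chars.replace.go, hpre]]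
        rw [ih t (c :: acc) (by simpa using Nat.le_of_succ_le_succ h)]
        simp [hc]

lemma replace_single (l : List Char) :
    PySem.Chars.replace l ['\\'] ['/'] = l.map (fun ch => if ch = '\\' then '/' else ch) := by
  rw [PySem.Chars.replace]
  simp only [List.isEmpty_cons, Bool.false_eq_true, if_false]
  exact (replace_go_single l.length l [] (le_refl _)).trans (by simp)

-- proof-only helper: an accumulator-based scan of the path, bridging A's substring
-- characterisation and B's split
def altGo : List Char → List Char → Bool
  | [], _cur => false
  | c :: rest, cur =>
    if c = '/' then
      (if cur ∈ vendorNames then true else altGo rest [])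
    else
      altGo rest (cur ++ [c])

lemma altGo_iff (l : List Char) : ∀ (cur : List Char),
    altGo l cur = true ↔
      ((∃ r, ('/' : Char) ∉ r ∧ r ++ ['/'] <+: l ∧ (cur ++ r) ∈ vendorNames) ∨
       (∃ w ∈ vendorNames, ('/' :: (w ++ ['/'])) <:+: l)) := by
  induction l with
  | nil =>
    intro cur
    simp [altGo, List.prefix_nil, List.infix_nil]
  | cons c rest ih =>
    intro cur
    by_cases hc : c = '/'
    · subst hc
      by_cases hm : cur ∈ vendorNames
      · have hstep : altGo ('/' :: rest) cur = true := by simp [altGo, hm]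
        rw [hstep]
        exact iff_of_true rfl (Or.inl ⟨[], by simp, by simp, by simpa using hm⟩)
      · have hstep : altGo ('/' :: rest) cur = altGo rest [] := by simp [altGo, hm]
        rw [hstep, ih []]
        constructor
        · rintro (⟨r, hr, hpre, hmem⟩ | ⟨w, hw, hinf⟩)
          · exact Or.inr ⟨r, by simpa using hmem,
              List.infix_cons_iff.mpr (Or.inl (List.cons_prefix_cons.mpr ⟨rfl, hpre⟩))⟩
          · exact Or.inr ⟨w, hw, List.infix_cons_iff.mpr (Or.inr hinf)⟩
        · rintro (⟨r, hr, hpre, hmem⟩ | ⟨w, hw, hinf⟩)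
          · cases r with
            | nil => exact absurd (by simpa using hmem) hm
            | cons x r' =>
              have hx : x = '/' := (List.cons_prefix_cons.mp hpre).1
              subst hx
              exact absurd (show ('/' : Char) ∈ '/' :: r' by simp) hr
          · rcases List.infix_cons_iff.mp hinf with hpre | hinf'
            · exact Or.inl ⟨w, slash_not_mem_vendorNames w hw,
                (List.cons_prefix_cons.mp hpre).2, by simpa using hw⟩
            · exact Or.inr ⟨w, hw, hinf'⟩
    · have hstep : altGo (c :: rest) cur = altGo rest (cur ++ [c]) := by simp [altGo, hc]
      rw [hstep, ih (cur ++ [c])]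
      constructor
      · rintro (⟨r, hr, hpre, hmem⟩ | ⟨w, hw, hinf⟩)
        · refine Or.inl ⟨c :: r, ?_, List.cons_prefix_cons.mpr ⟨rfl, hpre⟩,
            by simpa [List.append_assoc, List.singleton_append] using hmem⟩
          intro h
          rcases List.mem_cons.mp h with h1 | h1
          · exact hc h1.symm
          · exact hr h1
        · exact Or.inr ⟨w, hw, List.infix_cons_iff.mpr (Or.inr hinf)⟩
      · rintro (⟨r, hr, hpre, hmem⟩ | ⟨w, hw, hinf⟩)
        · cases r with
          | nil =>
            have h1 : ('/' : Char) = c := by simpa using hpre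
            exact absurd h1.symm hc
          | cons x r' =>
            obtain ⟨hx, hp⟩ := List.cons_prefix_cons.mp hpre
            subst hx
            exact Or.inl ⟨r', fun h => hr (List.mem_cons_of_mem _ h), hp,
              by simpa [List.append_assoc, List.singleton_append] using hmem⟩
        · rcases List.infix_cons_iff.mp hinf with hpre | hinf'
          · exact absurd ((List.cons_prefix_cons.mp hpre).1).symm hc
          · exact Or.inr ⟨w, hw, hinf'⟩

-- A's loop finds exactly: some vendor name as leading component or as an inner full component.
lemma checkA_iff (l : List Char) : checkA l = true ↔
    ∃ w ∈ vendorNames, ((w ++ ['/']) <+: l ∨ ('/' :: (w ++ ['/'])) <:+: l) := by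
  rw [checkA, List.any_eq_true]
  constructor
  · rintro ⟨p, hp, h⟩
    rw [if_pos (endswith_all p hp)] at h
    rcases List.mem_map.mp (patterns_eq ▸ hp) with ⟨w, hw, rfl⟩
    rcases Bool.or_eq_true_iff.mp h with h1 | h1
    · exact ⟨w, hw, Or.inl ((PySem.Chars.startswith_iff _ _).mp h1)⟩
    · exact ⟨w, hw, Or.inr (by simpa using (PySem.Chars.isIn_iff_infix _ _).mp h1)⟩
  · rintro ⟨w, hw, h⟩
    have hp : w ++ ['/'] ∈ vendorPatterns := by
      rw [patterns_eq]; exact List.mem_map.mpr ⟨w, hw, rfl⟩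
    refine ⟨w ++ ['/'], hp, ?_⟩
    rw [if_pos (endswith_all _ hp)]
    rcases h with h1 | h1
    · exact Bool.or_eq_true_iff.mpr (Or.inl ((PySem.Chars.startswith_iff _ _).mpr h1))
    · exact Bool.or_eq_true_iff.mpr (Or.inr ((PySem.Chars.isIn_iff_infix _ _).mpr (by simpa using h1)))

lemma checkA_altGo (l : List Char) : checkA l = altGo l [] := by
  have h : checkA l = true ↔ altGo l [] = true := by
    rw [checkA_iff, altGo_iff l []]
    constructor
    · rintro ⟨w, hw, hp | hi⟩
      · exact Or.inl ⟨w, slash_not_mem_vendorNames w hw, hp, by simpa using hw⟩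
      · exact Or.inr ⟨w, hw, hi⟩
    · rintro (⟨r, _, hp, hm⟩ | ⟨w, hw, hi⟩)
      · exact ⟨r, by simpa using hm, Or.inl hp⟩
      · exact ⟨w, hw, Or.inr hi⟩
  cases hA : checkA l <;> cases hB : altGo l [] <;> simp_all

lemma splitSlash_ne_nil (l : List Char) : splitSlash l ≠ [] := by
  cases l with
  | nil => simp [splitSlash]
  | cons c rest =>
    by_cases hc : c = '/'
    · simp [splitSlash, hc]
    · simp only [splitSlash, if_neg hc]
      cases splitSlash rest <;> simp

-- the accumulator scan equals the split-based membership test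
lemma altGo_split (l : List Char) : ∀ (cur : List Char),
    altGo l cur =
      ((splitSlash l).modifyHead (fun s => cur ++ s)).dropLast.any
        (fun seg => decide (seg ∈ vendorNames)) := by
  induction l with
  | nil => intro cur; simp [altGo, splitSlash]
  | cons c rest ih =>
    intro cur
    by_cases hc : c = '/'
    · subst hc
      obtain ⟨s, ss, hss⟩ : ∃ s ss, splitSlash rest = s :: ss := by
        cases h : splitSlash rest with
        | nil => exact absurd h (splitSlash_ne_nil rest)
        | cons a b => exact ⟨a, b, rfl⟩
      by_cases hm : cur ∈ vendorNames
      · simp [altGo, splitSlash, hss, hm]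
      · have h1 : altGo ('/' :: rest) cur = altGo rest [] := by simp [altGo, hm]
        rw [h1, ih []]
        simp [splitSlash, hss, hm]
    · have h1 : altGo (c :: rest) cur = altGo rest (cur ++ [c]) := by simp [altGo, hc]
      rw [h1, ih (cur ++ [c])]
      obtain ⟨s, ss, hss⟩ : ∃ s ss, splitSlash rest = s :: ss := by
        cases h : splitSlash rest with
        | nil => exact absurd h (splitSlash_ne_nil rest)
        | cons a b => exact ⟨a, b, rfl⟩
      simp [splitSlash, if_neg hc, hss, List.modifyHead, List.append_assoc]

-- ===== VERDICT (by name: the statement is the Claim_ definition above) =====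
theorem is_vendor_py_spec : Claim_equal_is_vendor_py := by
  intro rp _
  unfold Spec_is_vendor_py is_vendor_py is_vendor_py_alt
  rw [replace_single, checkA_altGo, altGo_split _ []]
  have hmod : ((splitSlash ((PySem.Chars.lower rp.toList).map
      (fun ch => if ch = '\\' then '/' else ch))).modifyHead (fun s => [] ++ s)) =
      splitSlash ((PySem.Chars.lower rp.toList).map (fun ch => if ch = '\\' then '/' else ch)) := by
    cases splitSlash ((PySem.Chars.lower rp.toList).map (fun ch => if ch = '\\' then '/' else ch)) <;>
      simp [List.modifyHead]
  rw [hmod]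
  simp [List.all_eq_not_any_not]
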